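-- pv_equiv track=rewrite | github.com/hjylha/krypto | krypto.py | get_substitution_tuple
-- ===== SOURCE A (Python) =====
-- def get_substitution_tuple(codewords, words, previous_substitution_tuple=None):
--     substitution_pairs = [] if previous_substitution_tuple is None else list(previous_substitution_tuple)
--     for codeword, word in zip(codewords, words):
--         for num, char in zip(codeword, word):
--             if num in [c_r for c_r, c in substitution_pairs]:
--                 continue
--             substitution_pairs.append((num, char))
--     return tuple(sorted(substitution_pairs, key=lambda p: p[0]))
-- ===== SOURCE B (Python) =====
-- def get_substitution_tuple(codewords, words, previous_substitution_tuple=None):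
--     prev = [] if previous_substitution_tuple is None else list(previous_substitution_tuple)
--     flat = []
--     for codeword, word in zip(codewords, words):
--         flat.extend(zip(codeword, word))
--     flat.sort(key=lambda p: p[0])
--     taken = {num for num, _ in prev}
--     new = [pair for pair in flat if pair[0] not in taken]
--     uniq = []
--     for pair in new:
--         if not uniq or uniq[-1][0] != pair[0]:
--             uniq.append(pair)
--     return tuple(sorted(prev + uniq, key=lambda p: p[0]))
-- ===== Notes on version B (the rewrite author's own statement) =====
-- stated objective: alternative
-- what changed: A filters duplicate nums online by rescanning a freshly built key list for every pair and then sorts everything; B collects the new pairs unfiltered, stable-sorts them by num once, drops duplicates in a single linear pass over the sorted list (first of each equal-num run wins, nums already in the previous tuple removed by one set lookup), and sorts the merged result.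
import Mathlib
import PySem

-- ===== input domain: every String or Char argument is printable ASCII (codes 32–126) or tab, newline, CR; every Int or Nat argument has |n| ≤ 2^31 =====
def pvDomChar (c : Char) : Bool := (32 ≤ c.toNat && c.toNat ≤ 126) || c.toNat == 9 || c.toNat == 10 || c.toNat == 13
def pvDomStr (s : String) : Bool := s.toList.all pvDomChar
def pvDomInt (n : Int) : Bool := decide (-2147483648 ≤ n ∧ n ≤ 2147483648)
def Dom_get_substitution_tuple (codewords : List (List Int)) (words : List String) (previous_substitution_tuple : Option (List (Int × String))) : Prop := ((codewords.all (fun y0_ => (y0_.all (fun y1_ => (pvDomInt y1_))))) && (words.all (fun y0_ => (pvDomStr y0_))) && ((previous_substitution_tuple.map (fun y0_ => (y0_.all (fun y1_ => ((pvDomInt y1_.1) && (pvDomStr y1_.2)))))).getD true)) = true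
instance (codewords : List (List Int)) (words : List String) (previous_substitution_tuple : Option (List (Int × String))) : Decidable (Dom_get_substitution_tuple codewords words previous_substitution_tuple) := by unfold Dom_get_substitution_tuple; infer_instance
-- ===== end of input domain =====

-- ===== PORT A =====
-- B replaces A's per-pair rescan of the accumulated key list by one stable sort of the new
-- pairs plus a linear dedup pass; proved equal on every input.
def get_substitution_tuple (codewords : List (List Int)) (words : List String) (previous_substitution_tuple : Option (List (Int × String))) : List (Int × String) :=
  let init : List (Int × String) := match previous_substitution_tuple with
    | none => []
    | some l => l
  let pairs := (codewords.zip words).foldl (fun s cw_w =>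
      (cw_w.1.zip cw_w.2.toList).foldl (fun s nc =>
        if nc.1 ∈ s.map Prod.fst then s else s ++ [(nc.1, String.mk [nc.2])]) s) init
  PySem.List.sorted pairs (fun p => p.1) false

-- ===== PORT B =====
def get_substitution_tuple_alt (codewords : List (List Int)) (words : List String) (previous_substitution_tuple : Option (List (Int × String))) : List (Int × String) :=
  let prevL : List (Int × String) := match previous_substitution_tuple with
    | none => []
    | some l => l
  let flat := (codewords.zip words).foldl (fun acc cw_w =>
      acc ++ cw_w.1.zip (cw_w.2.toList.map (fun c => String.mk [c]))) []
  let flatS := PySem.List.sorted flat (fun p => p.1) false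
  let taken := PySem.Set.ofList (prevL.map Prod.fst)
  let newL := flatS.filter (fun p => !decide (p.1 ∈ taken))
  let uniq := newL.foldl (fun res p =>
    match res.getLast? with
    | none => res ++ [p]
    | some q => if q.1 ≠ p.1 then res ++ [p] else res) []
  PySem.List.sorted (prevL ++ uniq) (fun p => p.1) false

-- ===== PRECONDITION & SPEC =====
def Spec_get_substitution_tuple (codewords : List (List Int)) (words : List String) (previous_substitution_tuple : Option (List (Int × String))) (out : List (Int × String)) : Prop := out = get_substitution_tuple_alt codewords words previous_substitution_tuple
instance (codewords : List (List Int)) (words : List String) (previous_substitution_tuple : Option (List (Int × String))) (out : List (Int × String)) : Decidable (Spec_get_substitution_tuple codewords words previous_substitution_tuple out) := by unfold Spec_get_substitution_tuple; infer_instance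

-- ===== CLAIM (what is proved, stated in full; the proofs are below) =====
def Claim_equal_get_substitution_tuple : Prop := ∀ (codewords : List (List Int)) (words : List String) (previous_substitution_tuple : Option (List (Int × String))), Dom_get_substitution_tuple codewords words previous_substitution_tuple → Spec_get_substitution_tuple codewords words previous_substitution_tuple (get_substitution_tuple codewords words previous_substitution_tuple)

-- ===== LEMMAS AND PROOFS =====

/-- First-occurrence-per-key filter (what A's online duplicate test computes). -/
def keepF : List (Int × String) → List Int → List (Int × String)
  | [], _ => []
  | p :: t, seen => if p.1 ∈ seen then keepF t seen else p :: keepF t (p.1 :: seen)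

def dr : Option Int → List (Int × String) → List (Int × String)
  | _, [] => []
  | last, p :: t => if last = some p.1 then dr last t else p :: dr (some p.1) t

theorem keepF_congr (F : List (Int × String)) (s1 s2 : List Int)
    (h : ∀ k, k ∈ s1 ↔ k ∈ s2) : keepF F s1 = keepF F s2 := by
  induction F generalizing s1 s2 with
  | nil => simp [keepF]
  | cons p t ih =>
    simp only [keepF]
    by_cases hm : p.1 ∈ s1
    · rw [if_pos hm, if_pos ((h p.1).mp hm)]; exact ih _ _ h
    · rw [if_neg hm, if_neg (fun hc => hm ((h p.1).mpr hc))]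
      exact congrArg _ (ih _ _ (fun k => by simp only [List.mem_cons]; rw [h k]))

theorem foldlA_eq_keepF (F : List (Int × String)) (s : List (Int × String)) :
    F.foldl (fun s p => if p.1 ∈ s.map Prod.fst then s else s ++ [p]) s
      = s ++ keepF F (s.map Prod.fst) := by
  induction F generalizing s with
  | nil => simp [keepF]
  | cons p t ih =>
    simp only [List.foldl_cons, keepF]
    by_cases hm : p.1 ∈ s.map Prod.fst
    · rw [if_pos hm, if_pos hm, ih]
    · rw [if_neg hm, if_neg hm, ih]
      rw [List.append_assoc]
      congr 1
      rw [keepF_congr t ((s ++ [p]).map Prod.fst) (p.1 :: s.map Prod.fst)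
        (fun k => by simp [List.mem_append, or_comm])]
      simp

theorem foldlB_eq_dr (t : List (Int × String)) (acc : List (Int × String)) :
    t.foldl (fun res p =>
      match res.getLast? with
      | none => res ++ [p]
      | some q => if q.1 ≠ p.1 then res ++ [p] else res) acc
      = acc ++ dr ((acc.getLast?).map Prod.fst) t := by
  induction t generalizing acc with
  | nil => simp [dr]
  | cons p t ih =>
    simp only [List.foldl_cons]
    cases hl : acc.getLast? with
    | none =>
      simp only [hl, Option.map_none]
      rw [ih]
      simp [dr, List.getLast?_append]
    | some q =>
      simp only [hl, ne_eq, Option.map_some]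
      by_cases hq : q.1 = p.1
      · rw [if_neg (by simp [hq]), ih, hl]
        simp [dr, hq]
      · rw [if_pos hq, ih]
        simp only [dr, List.getLast?_append, Option.map_some]
        rw [if_neg (by simpa using hq)]
        simp

theorem keepF_mem (F : List (Int × String)) (seen : List Int) (x : Int × String) :
    x ∈ keepF F seen ↔ x.1 ∉ seen ∧ F.find? (fun p => p.1 == x.1) = some x := by
  induction F generalizing seen with
  | nil => simp [keepF]
  | cons p t ih =>
    simp only [keepF]
    by_cases hx : p.1 = x.1
    · rw [List.find?_cons_of_pos (by simp [hx])]
      by_cases hm : p.1 ∈ seen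
      · rw [if_pos hm, ih]
        have hxs : x.1 ∈ seen := hx ▸ hm
        simp [hxs]
      · rw [if_neg hm]
        simp only [List.mem_cons, ih]
        constructor
        · rintro (rfl | ⟨hns, hf⟩)
          · exact ⟨hx ▸ hm, rfl⟩
          · exact absurd (Or.inl hx.symm) hns
        · rintro ⟨hns, hpx⟩
          exact Or.inl (by cases hpx; rfl)
    · rw [List.find?_cons_of_neg (by simp [hx])]
      by_cases hm : p.1 ∈ seen
      · rw [if_pos hm, ih]
      · rw [if_neg hm]
        simp only [List.mem_cons, ih, not_or]
        constructor
        · rintro (rfl | ⟨⟨h1, h2⟩, hf⟩)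
          · exact absurd rfl hx
          · exact ⟨h2, hf⟩
        · rintro ⟨hns, hf⟩
          exact Or.inr ⟨⟨fun h => hx h.symm, hns⟩, hf⟩

theorem keepF_keys_nodup (F : List (Int × String)) (seen : List Int) :
    ((keepF F seen).map Prod.fst).Nodup ∧ ∀ k ∈ (keepF F seen).map Prod.fst, k ∉ seen := by
  induction F generalizing seen with
  | nil => simp [keepF]
  | cons p t ih =>
    simp only [keepF]
    by_cases hm : p.1 ∈ seen
    · rw [if_pos hm]; exact ih seen
    · rw [if_neg hm]
      obtain ⟨hn, hs⟩ := ih (p.1 :: seen)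
      refine ⟨List.nodup_cons.mpr ⟨fun hc => (hs _ hc) (by simp), hn⟩, ?_⟩
      intro k hk
      simp only [List.map_cons, List.mem_cons] at hk
      rcases hk with rfl | hk
      · exact hm
      · exact fun hc => (hs k hk) (by simp [hc])

theorem dr_strict (m : List (Int × String)) (k : Int)
    (hp : m.Pairwise (fun a b => a.1 ≤ b.1)) (hk : ∀ a ∈ m, k ≤ a.1) :
    (dr (some k) m).Pairwise (fun a b => a.1 < b.1) ∧ ∀ a ∈ dr (some k) m, k < a.1 := by
  induction m generalizing k with
  | nil => simp [dr]
  | cons p t ih =>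
    simp only [dr]
    rw [List.pairwise_cons] at hp
    by_cases hpk : k = p.1
    · rw [if_pos (by simp [hpk])]
      exact ih k hp.2 (fun a ha => hpk ▸ (hpk ▸ hp.1 a ha))
    · rw [if_neg (by simpa using hpk)]
      have hklt : k < p.1 := lt_of_le_of_ne (hk p (by simp)) hpk
      obtain ⟨h1, h2⟩ := ih p.1 hp.2 hp.1
      refine ⟨List.pairwise_cons.mpr ⟨h2, h1⟩, ?_⟩
      intro a ha
      rcases List.mem_cons.mp ha with rfl | ha
      · exact hklt
      · exact lt_trans hklt (h2 a ha)

theorem dr_none_strict (m : List (Int × String))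
    (hp : m.Pairwise (fun a b => a.1 ≤ b.1)) :
    (dr none m).Pairwise (fun a b => a.1 < b.1) := by
  cases m with
  | nil => simp [dr]
  | cons p t =>
    rw [List.pairwise_cons] at hp
    simp only [dr, reduceCtorEq, if_false]
    obtain ⟨h1, h2⟩ := dr_strict t p.1 hp.2 hp.1
    exact List.pairwise_cons.mpr ⟨h2, h1⟩

theorem dr_mem_some (m : List (Int × String)) (k : Int) (x : Int × String)
    (hp : m.Pairwise (fun a b => a.1 ≤ b.1)) (hk : ∀ a ∈ m, k ≤ a.1) :
    x ∈ dr (some k) m ↔ x.1 ≠ k ∧ m.find? (fun p => p.1 == x.1) = some x := by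
  induction m generalizing k with
  | nil => simp [dr]
  | cons p t ih =>
    simp only [dr]
    rw [List.pairwise_cons] at hp
    by_cases hx : p.1 = x.1
    · rw [List.find?_cons_of_pos (by simp [hx])]
      by_cases hpk : k = p.1
      · rw [if_pos (by simp [hpk])]
        rw [ih k hp.2 (fun a ha => hpk ▸ (hpk ▸ hp.1 a ha))]
        have : x.1 = k := by rw [← hx, hpk]
        simp [this]
      · rw [if_neg (by simpa using hpk)]
        simp only [List.mem_cons]
        constructor
        · rintro (rfl | hmem)
          · exact ⟨fun h => hpk (hx.trans h).symm, rfl⟩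
          · have := ((ih p.1 hp.2 hp.1).mp hmem).1
            exact absurd hx.symm this
        · rintro ⟨hne, hpx⟩
          exact Or.inl (by cases hpx; rfl)
    · rw [List.find?_cons_of_neg (by simp [hx])]
      by_cases hpk : k = p.1
      · rw [if_pos (by simp [hpk])]
        exact ih k hp.2 (fun a ha => hpk ▸ (hpk ▸ hp.1 a ha))
      · rw [if_neg (by simpa using hpk)]
        have hklt : k < p.1 := lt_of_le_of_ne (hk p (by simp)) hpk
        simp only [List.mem_cons]
        rw [ih p.1 hp.2 hp.1]
        constructor
        · rintro (rfl | ⟨hne, hf⟩)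
          · exact absurd rfl hx
          · refine ⟨?_, hf⟩
            have hxt : x ∈ t := List.mem_of_find?_eq_some hf
            have : p.1 ≤ x.1 := hp.1 x hxt
            omega
        · rintro ⟨hne, hf⟩
          exact Or.inr ⟨fun h => hx h.symm, hf⟩

theorem dr_mem_none (m : List (Int × String)) (x : Int × String)
    (hp : m.Pairwise (fun a b => a.1 ≤ b.1)) :
    x ∈ dr none m ↔ m.find? (fun p => p.1 == x.1) = some x := by
  cases m with
  | nil => simp [dr]
  | cons p t =>
    rw [List.pairwise_cons] at hp
    simp only [dr, reduceCtorEq, if_false]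
    by_cases hx : p.1 = x.1
    · rw [List.find?_cons_of_pos (by simp [hx])]
      simp only [List.mem_cons]
      constructor
      · rintro (rfl | hmem)
        · rfl
        · exact absurd hx.symm ((dr_mem_some t p.1 x hp.2 hp.1).mp hmem).1
      · intro hpx; exact Or.inl (by cases hpx; rfl)
    · rw [List.find?_cons_of_neg (by simp [hx])]
      simp only [List.mem_cons]
      rw [dr_mem_some t p.1 x hp.2 hp.1]
      constructor
      · rintro (rfl | ⟨hne, hf⟩)
        · exact absurd rfl hx
        · exact hf
      · intro hf
        exact Or.inr ⟨fun h => hx h.symm, hf⟩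

theorem find?_insertBy (y : Int × String) (ys : List (Int × String)) (k : Int)
    (hp : ys.Pairwise (fun a b => a.1 ≤ b.1)) :
    (PySem.List.insertBy (fun a b => decide (a.1 < b.1)) y ys).find? (fun p => p.1 == k)
      = (ys.find? (fun p => p.1 == k)).or (if y.1 == k then some y else none) := by
  induction ys with
  | nil => simp [PySem.List.insertBy, List.find?]
  | cons z zs ih =>
    rw [List.pairwise_cons] at hp
    by_cases hb : y.1 < z.1
    · rw [show PySem.List.insertBy (fun a b => decide (a.1 < b.1)) y (z :: zs) = y :: z :: zs by
        simp [PySem.List.insertBy, hb]]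
      by_cases hy : y.1 = k
      · rw [List.find?_cons_of_pos (by simp [hy]), if_pos (by simp [hy])]
        have hnone : (z :: zs).find? (fun p => p.1 == k) = none := by
          rw [List.find?_eq_none]
          intro a ha
          rcases List.mem_cons.mp ha with rfl | ha
          · simp; omega
          · have := hp.1 a ha; simp; omega
        rw [hnone]; rfl
      · rw [List.find?_cons_of_neg (by simp [hy]), if_neg (by simp [hy])]
        cases hzz : (z :: zs).find? (fun p => p.1 == k) <;> simp
    · rw [show PySem.List.insertBy (fun a b => decide (a.1 < b.1)) y (z :: zs)
          = z :: PySem.List.insertBy (fun a b => decide (a.1 < b.1)) y zs by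
        simp [PySem.List.insertBy, hb]]
      by_cases hz : z.1 = k
      · rw [List.find?_cons_of_pos (by simp [hz]), List.find?_cons_of_pos (by simp [hz])]
        rfl
      · rw [List.find?_cons_of_neg (by simp [hz]), List.find?_cons_of_neg (by simp [hz])]
        exact ih hp.2

theorem find?_sorted (M : List (Int × String)) (k : Int) :
    (PySem.List.sorted M (fun p => p.1) false).find? (fun p => p.1 == k)
      = M.find? (fun p => p.1 == k) := by
  induction M using List.reverseRecOn with
  | nil => simp [PySem.List.sorted]
  | append_singleton M y ih =>
    have h1 : PySem.List.sorted (M ++ [y]) (fun p => p.1) false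
        = PySem.List.insertBy (fun a b => decide (a.1 < b.1)) y
            (PySem.List.sorted M (fun p => p.1) false) := by
      rw [PySem.List.sorted_eq_foldl_insertBy, PySem.List.sorted_eq_foldl_insertBy]
      simp [List.foldl_append]
    rw [h1, find?_insertBy _ _ _ (PySem.List.sorted_pairwise M (fun p => p.1)), ih,
      List.find?_append]
    congr 1
    simp only [List.find?]
    cases h : (y.1 == k) <;> simp [h]

theorem main_lemma (M : List (Int × String)) :
    PySem.List.sorted (keepF M []) (fun p => p.1) false
      = dr none (PySem.List.sorted M (fun p => p.1) false) := by
  have hsp := PySem.List.sorted_pairwise M (fun p => (p.1 : Int))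
  have hstrict := dr_none_strict _ hsp
  apply PySem.List.sorted_eq_of_perm_of_pairwise_lt
  · have hn1 : (dr none (PySem.List.sorted M (fun p => p.1) false)).Nodup :=
      hstrict.imp (fun h he => by rw [he] at h; exact lt_irrefl _ h)
    have hn2 : (keepF M []).Nodup := List.Nodup.of_map Prod.fst (keepF_keys_nodup M []).1
    rw [List.perm_ext_iff_of_nodup hn1 hn2]
    intro x
    rw [dr_mem_none _ _ hsp, find?_sorted, keepF_mem]
    simp
  · exact hstrict

theorem keepF_filter (F : List (Int × String)) (ks seen : List Int) :
    keepF (F.filter (fun p => !decide (p.1 ∈ ks))) seen = keepF F (seen ++ ks) := by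
  induction F generalizing seen with
  | nil => simp [keepF]
  | cons p t ih =>
    by_cases hk : p.1 ∈ ks
    · rw [List.filter_cons_of_neg (by simp [hk])]
      rw [show keepF (p :: t) (seen ++ ks) = keepF t (seen ++ ks) by
        simp [keepF, List.mem_append, hk]]
      exact ih seen
    · rw [List.filter_cons_of_pos (by simp [hk])]
      simp only [keepF, List.mem_append, hk, or_false]
      by_cases hs : p.1 ∈ seen
      · rw [if_pos hs, if_pos hs]
        exact ih seen
      · rw [if_neg hs, if_neg hs]
        exact congrArg _ (ih (p.1 :: seen))

theorem insertBy_head (y : Int × String) (l : List (Int × String))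
    (h : ∀ w ∈ l, y.1 < w.1) :
    PySem.List.insertBy (fun a b => decide (a.1 < b.1)) y l = y :: l := by
  cases l with
  | nil => simp [PySem.List.insertBy]
  | cons z zs => simp [PySem.List.insertBy, h z (by simp)]

theorem filter_insertBy (P : Int × String → Bool) (y : Int × String) (ys : List (Int × String))
    (hp : ys.Pairwise (fun a b => a.1 ≤ b.1)) :
    (PySem.List.insertBy (fun a b => decide (a.1 < b.1)) y ys).filter P
      = if P y then PySem.List.insertBy (fun a b => decide (a.1 < b.1)) y (ys.filter P)
        else ys.filter P := by
  induction ys with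
  | nil => cases hPy : P y <;> simp [PySem.List.insertBy, List.filter, hPy]
  | cons z zs ih =>
    rw [List.pairwise_cons] at hp
    by_cases hb : y.1 < z.1
    · rw [show PySem.List.insertBy (fun a b => decide (a.1 < b.1)) y (z :: zs) = y :: z :: zs by
        simp [PySem.List.insertBy, hb]]
      by_cases hPy : P y
      · rw [List.filter_cons_of_pos hPy, if_pos hPy]
        rw [insertBy_head y ((z :: zs).filter P) (fun w hw => by
          rcases List.mem_cons.mp (List.mem_of_mem_filter hw) with rfl | hw'
          · exact hb
          · exact lt_of_lt_of_le hb (hp.1 w hw'))]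
      · rw [List.filter_cons_of_neg (by simpa using hPy), if_neg (by simpa using hPy)]
    · rw [show PySem.List.insertBy (fun a b => decide (a.1 < b.1)) y (z :: zs)
          = z :: PySem.List.insertBy (fun a b => decide (a.1 < b.1)) y zs by
        simp [PySem.List.insertBy, hb]]
      by_cases hPz : P z
      · rw [List.filter_cons_of_pos hPz, List.filter_cons_of_pos hPz, ih hp.2]
        by_cases hPy : P y
        · rw [if_pos hPy, if_pos hPy]
          rw [show PySem.List.insertBy (fun a b => decide (a.1 < b.1)) y (z :: zs.filter P)
              = z :: PySem.List.insertBy (fun a b => decide (a.1 < b.1)) y (zs.filter P) by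
            simp [PySem.List.insertBy, hb]]
        · rw [if_neg (by simpa using hPy), if_neg (by simpa using hPy)]
      · rw [List.filter_cons_of_neg (by simpa using hPz), List.filter_cons_of_neg (by simpa using hPz), ih hp.2]

theorem filter_sorted (P : Int × String → Bool) (M : List (Int × String)) :
    (PySem.List.sorted M (fun p => p.1) false).filter P
      = PySem.List.sorted (M.filter P) (fun p => p.1) false := by
  induction M using List.reverseRecOn with
  | nil => simp [PySem.List.sorted]
  | append_singleton M y ih =>
    have h1 : PySem.List.sorted (M ++ [y]) (fun p => p.1) false
        = PySem.List.insertBy (fun a b => decide (a.1 < b.1)) y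
            (PySem.List.sorted M (fun p => p.1) false) := by
      rw [PySem.List.sorted_eq_foldl_insertBy, PySem.List.sorted_eq_foldl_insertBy]
      simp [List.foldl_append]
    rw [h1, filter_insertBy P y _ (PySem.List.sorted_pairwise M (fun p => p.1)), ih,
      List.filter_append]
    by_cases hPy : P y
    · rw [if_pos hPy, List.filter_cons_of_pos hPy, List.filter_nil]
      rw [PySem.List.sorted_eq_foldl_insertBy, PySem.List.sorted_eq_foldl_insertBy]
      simp [List.foldl_append]
    · rw [if_neg (by simpa using hPy), List.filter_cons_of_neg (by simpa using hPy), List.filter_nil,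
        List.append_nil]

theorem insertBy_comm (a b : Int × String) (S : List (Int × String)) (hab : a.1 ≠ b.1) :
    PySem.List.insertBy (fun x y => decide (x.1 < y.1)) a
      (PySem.List.insertBy (fun x y => decide (x.1 < y.1)) b S)
    = PySem.List.insertBy (fun x y => decide (x.1 < y.1)) b
      (PySem.List.insertBy (fun x y => decide (x.1 < y.1)) a S) := by
  induction S with
  | nil =>
    simp only [PySem.List.insertBy]
    rcases lt_or_gt_of_ne hab with h | h
    · simp [PySem.List.insertBy, h, not_lt.mpr (le_of_lt h)]
    · simp [PySem.List.insertBy, h, not_lt.mpr (le_of_lt h)]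
  | cons z zs ih =>
    by_cases ca : a.1 < z.1 <;> by_cases cb : b.1 < z.1
    · rcases lt_or_gt_of_ne hab with h | h
      · simp [PySem.List.insertBy, ca, cb, h, not_lt.mpr (le_of_lt h)]
      · simp [PySem.List.insertBy, ca, cb, h, not_lt.mpr (le_of_lt h)]
    · have h : a.1 < b.1 := lt_of_lt_of_le ca (not_lt.mp cb)
      simp [PySem.List.insertBy, ca, cb, h, not_lt.mpr (le_of_lt h)]
    · have h : b.1 < a.1 := lt_of_lt_of_le cb (not_lt.mp ca)
      simp [PySem.List.insertBy, ca, cb, h, not_lt.mpr (le_of_lt h)]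
    · simp [PySem.List.insertBy, ca, cb, ih]

theorem sorted_append_sorted (L X : List (Int × String))
    (hX : (X.map Prod.fst).Nodup) :
    PySem.List.sorted (L ++ PySem.List.sorted X (fun p => p.1) false) (fun p => p.1) false
      = PySem.List.sorted (L ++ X) (fun p => p.1) false := by
  have e : ∀ Y : List (Int × String), PySem.List.sorted (L ++ Y) (fun p => p.1) false
      = Y.foldl (fun acc x => PySem.List.insertBy (fun a b => decide (a.1 < b.1)) x acc)
          (PySem.List.sorted L (fun p => p.1) false) := by
    intro Y
    rw [PySem.List.sorted_eq_foldl_insertBy, List.foldl_append, ← PySem.List.sorted_eq_foldl_insertBy]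
  rw [e, e]
  apply List.Perm.foldl_eq' (PySem.List.sorted_perm X (fun p => p.1) false)
  intro x hx y hy z
  by_cases hxy : x = y
  · rw [hxy]
  · have hx' : x ∈ X := (PySem.List.sorted_perm X (fun p => p.1) false).mem_iff.mp hx
    have hy' : y ∈ X := (PySem.List.sorted_perm X (fun p => p.1) false).mem_iff.mp hy
    have hne : x.1 ≠ y.1 := by
      intro he
      have := List.inj_on_of_nodup_map hX hx' hy' he
      exact hxy this
    exact insertBy_comm y x z hne.symm

theorem core_eq (codewords : List (List Int)) (words : List String)
    (L : List (Int × String)) :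
    PySem.List.sorted ((codewords.zip words).foldl (fun s cw_w =>
      (cw_w.1.zip cw_w.2.toList).foldl (fun s nc =>
        if nc.1 ∈ s.map Prod.fst then s else s ++ [(nc.1, String.mk [nc.2])]) s) L)
      (fun p => p.1) false
    = PySem.List.sorted (L ++
        ((PySem.List.sorted ((codewords.zip words).foldl (fun acc cw_w =>
            acc ++ cw_w.1.zip (cw_w.2.toList.map (fun c => String.mk [c]))) [])
          (fun p => p.1) false).filter
            (fun p => !decide (p.1 ∈ PySem.Set.ofList (L.map Prod.fst)))).foldl
          (fun res p =>
            match res.getLast? with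
            | none => res ++ [p]
            | some q => if q.1 ≠ p.1 then res ++ [p] else res) [])
      (fun p => p.1) false := by
  have hA : (codewords.zip words).foldl (fun s cw_w =>
      (cw_w.1.zip cw_w.2.toList).foldl (fun s nc =>
        if nc.1 ∈ s.map Prod.fst then s else s ++ [(nc.1, String.mk [nc.2])]) s) L
      = (((codewords.zip words).flatMap (fun cw_w => cw_w.1.zip cw_w.2.toList)).map
          (fun nc => ((nc.1 : Int), String.mk [nc.2]))).foldl
          (fun s p => if p.1 ∈ s.map Prod.fst then s else s ++ [p]) L := by
    rw [List.foldl_map, List.foldl_flatMap]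
  have hB : (codewords.zip words).foldl (fun acc cw_w =>
      acc ++ cw_w.1.zip (cw_w.2.toList.map (fun c => String.mk [c]))) []
      = ((codewords.zip words).flatMap (fun cw_w => cw_w.1.zip cw_w.2.toList)).map
          (fun nc => ((nc.1 : Int), String.mk [nc.2])) := by
    rw [PySem.List.foldl_append_eq_flatMap]
    rw [List.map_flatMap, List.nil_append]
    congr 1
    funext cw_w
    rw [List.zip_map_right]
    rfl
  set F := ((codewords.zip words).flatMap (fun cw_w => cw_w.1.zip cw_w.2.toList)).map
      (fun nc => ((nc.1 : Int), String.mk [nc.2])) with hF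
  rw [hA, hB, foldlA_eq_keepF, foldlB_eq_dr]
  simp only [List.getLast?_nil, Option.map_none, List.nil_append]
  have hfc : (PySem.List.sorted F (fun p => p.1) false).filter
        (fun p => !decide (p.1 ∈ PySem.Set.ofList (L.map Prod.fst)))
      = (PySem.List.sorted F (fun p => p.1) false).filter
        (fun p => !decide (p.1 ∈ L.map Prod.fst)) :=
    List.filter_congr (fun x _ => by simp [PySem.Set.mem_ofList])
  rw [hfc, filter_sorted, ← main_lemma, keepF_filter]
  exact (sorted_append_sorted L _ (keepF_keys_nodup F (List.nil ++ L.map Prod.fst)).1).symm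

-- ===== VERDICT (by name: the statement is the Claim_ definition above) =====
theorem get_substitution_tuple_spec : Claim_equal_get_substitution_tuple := by
  intro codewords words prev _hDom
  unfold Spec_get_substitution_tuple
  cases prev with
  | none => exact core_eq codewords words []
  | some l => exact core_eq codewords words l
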